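-- pv_equiv track=rewrite | github.com/darizae/bio-claim-gen | data/claims_sanity_check.py | check_empty_claim_strategies
-- ===== SOURCE A (Python) =====
-- def check_empty_claim_strategies(data):
--     """
--     Checks if any strategies have an empty array across all abstracts.
--     Returns a list of strategies that are empty in every single entry.
--     """
--     strategy_counts = {}
--
--     for entry in data:
--         claims = entry.get("claims", {})
--         for strategy, claim_list in claims.items():
--             if strategy not in strategy_counts:
--                 strategy_counts[strategy] = 0
--             if claim_list:
--                 strategy_counts[strategy] += len(claim_list)
--
--     empty_strategies = [strategy for strategy, count in strategy_counts.items() if count == 0]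
--     return empty_strategies
-- ===== SOURCE B (Python) =====
-- def check_empty_claim_strategies(data):
--     """
--     Two-phase restructuring of A: first collect strategy names in
--     first-appearance order, then scan the entries per strategy and keep
--     the strategies for which no entry has a non-empty claim list.
--     """
--     order = []
--     for entry in data:
--         for strategy in entry.get("claims", {}):
--             if strategy not in order:
--                 order.append(strategy)
--     result = []
--     for strategy in order:
--         for entry in data:
--             if entry.get("claims", {}).get(strategy):
--                 break
--         else:
--             result.append(strategy)
--     return result
-- ===== Notes on version B (the rewrite author's own statement) =====
-- stated objective: alternative
-- what changed: A makes one pass accumulating per-strategy claim counts in a dict and filters its items for zero; B first collects strategy names in first-appearance order, then for each name scans the entries and keeps it only if no entry has a non-empty claim list for it.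
import Mathlib
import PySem

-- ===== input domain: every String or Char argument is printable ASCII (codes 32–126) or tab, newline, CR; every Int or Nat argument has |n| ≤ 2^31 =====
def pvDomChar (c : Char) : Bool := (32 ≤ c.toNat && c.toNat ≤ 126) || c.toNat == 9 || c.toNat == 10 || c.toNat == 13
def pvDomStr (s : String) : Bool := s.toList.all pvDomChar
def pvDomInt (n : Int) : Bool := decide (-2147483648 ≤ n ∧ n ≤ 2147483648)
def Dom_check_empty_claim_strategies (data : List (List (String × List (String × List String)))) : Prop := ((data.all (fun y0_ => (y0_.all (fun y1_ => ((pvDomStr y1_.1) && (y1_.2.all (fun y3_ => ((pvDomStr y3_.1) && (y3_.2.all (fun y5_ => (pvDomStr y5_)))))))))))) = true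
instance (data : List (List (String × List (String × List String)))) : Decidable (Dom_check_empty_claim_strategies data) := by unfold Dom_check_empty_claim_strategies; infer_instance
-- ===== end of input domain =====

-- B restructures A: instead of one counting pass into a dict, B collects the strategy
-- names in first-appearance order and then, per strategy, scans the entries for any
-- non-empty claim list (objective: alternative decomposition; no speed claim).


-- ===== PORT A =====
-- entry.get("claims", {}) as a dict; shared accessor: both Pythons contain this very expression
def pvEntryClaims (entry : List (String × List (String × List String))) : PySem.Dict String (List String) :=
  PySem.Dict.ofList ((PySem.Dict.ofList entry).getD "claims" [])

-- the body of A's inner loop over claims.items()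
def pvStepInner (sc : PySem.Dict String Int) (p : String × List String) : PySem.Dict String Int :=
  let sc1 := if sc.contains p.1 then sc else sc.insert p.1 0
  if p.2.isEmpty then sc1 else sc1.modify p.1 0 (· + (p.2.length : Int))

def check_empty_claim_strategies (data : List (List (String × List (String × List String)))) : List String :=
  let counts := data.foldl (fun sc entry => (pvEntryClaims entry).items.foldl pvStepInner sc) PySem.Dict.empty
  (counts.items.filter (fun p => p.2 == 0)).map (·.1)

-- ===== PORT B =====
-- first pass of Source B: strategy names in first-appearance order
def pvNamesStep (acc : List String) (entry : List (String × List (String × List String))) : List String :=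
  (pvEntryClaims entry).keys.foldl (fun acc s => if acc.contains s then acc else acc ++ [s]) acc

def pvNames (data : List (List (String × List (String × List String)))) : List String :=
  data.foldl pvNamesStep []

def check_empty_claim_strategies_alt (data : List (List (String × List (String × List String)))) : List String :=
  (pvNames data).filter
    (fun s => !(data.any (fun entry => !((pvEntryClaims entry).getD s []).isEmpty)))

-- ===== PRECONDITION & SPEC =====
def Spec_check_empty_claim_strategies (data : List (List (String × List (String × List String)))) (out : List String) : Prop := out = check_empty_claim_strategies_alt data
instance (data : List (List (String × List (String × List String)))) (out : List String) : Decidable (Spec_check_empty_claim_strategies data out) := by unfold Spec_check_empty_claim_strategies; infer_instance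

-- ===== CLAIM (what is proved, stated in full; the proofs are below) =====
def Claim_equal_check_empty_claim_strategies : Prop := ∀ (data : List (List (String × List (String × List String)))), Dom_check_empty_claim_strategies data → Spec_check_empty_claim_strategies data (check_empty_claim_strategies data)

-- ===== LEMMAS AND PROOFS =====

-- total claim-list length contributed by strategy s across data (the value A's dict holds for s)
def pvTot (s : String) (data : List (List (String × List (String × List String)))) : Int :=
  (data.map (fun e => (((pvEntryClaims e).getD s []).length : Int))).sum

-- one inner step changes the count of s by the contribution of p
lemma getD_pvStepInner (sc : PySem.Dict String Int) (p : String × List String) (s : String) :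
    (pvStepInner sc p).getD s 0 = sc.getD s 0 + (if p.1 = s then (p.2.length : Int) else 0) := by
  obtain ⟨k, cl⟩ := p
  unfold pvStepInner
  by_cases hs : k = s
  · subst hs
    by_cases hc : sc.contains k
    · by_cases he : cl.isEmpty
      · simp_all [List.isEmpty_iff]
      · simp [hc, he]
    · have h0 : sc.getD k 0 = 0 :=
        PySem.Dict.getD_of_not_contains sc 0 (by simpa using hc)
      by_cases he : cl.isEmpty
      · simp_all [List.isEmpty_iff]
      · simp [hc, he, h0]
  · by_cases hc : sc.contains k <;> by_cases he : cl.isEmpty <;>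
      simp [hc, he, PySem.Dict.getD_modify, PySem.Dict.getD_insert, hs, Ne.symm hs]

-- the inner fold over an items list adds the filtered length sum
lemma getD_foldl_pvStepInner (l : List (String × List String)) (sc : PySem.Dict String Int) (s : String) :
    (l.foldl pvStepInner sc).getD s 0
      = sc.getD s 0 + ((l.filter (fun p => p.1 = s)).map (fun p => (p.2.length : Int))).sum := by
  induction l generalizing sc with
  | nil => simp
  | cons p l ih =>
    simp only [List.foldl_cons, ih, getD_pvStepInner, List.filter_cons]
    by_cases hs : p.1 = s <;> simp [hs] <;> ring

-- on a nodup list, filtering for equality with s yields [s] or []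
lemma filter_eq_of_nodup (l : List String) (h : l.Nodup) (s : String) :
    l.filter (fun k => k = s) = if s ∈ l then [s] else [] := by
  induction l with
  | nil => simp
  | cons a l ih =>
    simp only [List.nodup_cons] at h
    rw [List.filter_cons]
    by_cases hs : a = s
    · subst hs; simp [h.1, ih h.2]
    · simp only [decide_eq_true_eq, hs, if_false, ih h.2, List.mem_cons]
      by_cases hm : s ∈ l <;> simp [hm, Ne.symm hs]

-- over a dict's items (nodup keys) the filtered length sum is the length of the lookup
lemma sum_filter_items (d : PySem.Dict String (List String)) (hn : d.keys.Nodup) (s : String) :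
    ((d.items.filter (fun p => p.1 = s)).map (fun p => (p.2.length : Int))).sum
      = ((d.getD s []).length : Int) := by
  rw [PySem.Dict.items_eq_map_keys d hn [], List.filter_map]
  have hcomp : ((fun (p : String × List String) => decide (p.1 = s)) ∘ (fun k => (k, d.getD k [])))
      = fun k => decide (k = s) := rfl
  rw [hcomp, filter_eq_of_nodup d.keys hn s]
  by_cases hm : s ∈ d.keys
  · simp [hm]
  · have h0 : d.getD s [] = [] := by
      apply PySem.Dict.getD_of_not_contains
      rw [PySem.Dict.contains_eq_decide_mem_keys]; simpa using hm
    simp [hm, h0]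

-- keys after one inner step
lemma keys_pvStepInner (sc : PySem.Dict String Int) (p : String × List String) :
    (pvStepInner sc p).keys = if p.1 ∈ sc.keys then sc.keys else sc.keys ++ [p.1] := by
  have hck : sc.contains p.1 = decide (p.1 ∈ sc.keys) := PySem.Dict.contains_eq_decide_mem_keys sc p.1
  unfold pvStepInner
  by_cases hm : p.1 ∈ sc.keys
  · by_cases he : p.2.isEmpty
    · simp [hck, hm, he]
    · rw [if_neg (by simp [he]), if_pos (by simp [hck, hm]), PySem.Dict.keys_modify,
        PySem.Dict.keys_insert_of_contains _ _ (by simp [hck, hm]), if_pos hm]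
  · by_cases he : p.2.isEmpty
    · rw [if_pos he, if_neg (by simp [hck, hm]), if_neg hm]
      exact PySem.Dict.keys_insert_of_not_contains _ _ (by simp [hck, hm])
    · rw [if_neg (by simp [he]), if_neg (by simp [hck, hm]), PySem.Dict.keys_modify,
        PySem.Dict.keys_insert_of_contains _ _ (by simp),
        PySem.Dict.keys_insert_of_not_contains _ _ (by simp [hck, hm]), if_neg hm]

-- keys of the inner fold = B's dedup fold over the keys
lemma keys_foldl_pvStepInner (l : List (String × List String)) (sc : PySem.Dict String Int) :
    (l.foldl pvStepInner sc).keys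
      = (l.map (·.1)).foldl (fun acc s => if acc.contains s then acc else acc ++ [s]) sc.keys := by
  induction l generalizing sc with
  | nil => simp
  | cons p l ih =>
    simp only [List.foldl_cons, List.map_cons, ih, keys_pvStepInner]
    by_cases hm : p.1 ∈ sc.keys <;> simp [hm]

-- outer fold: keys = B's name collection, values = running totals
lemma counts_outer (data : List (List (String × List (String × List String)))) (sc : PySem.Dict String Int) :
    (data.foldl (fun sc entry => (pvEntryClaims entry).items.foldl pvStepInner sc) sc).keys
        = data.foldl pvNamesStep sc.keys
    ∧ ∀ s, (data.foldl (fun sc entry => (pvEntryClaims entry).items.foldl pvStepInner sc) sc).getD s 0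
        = sc.getD s 0 + pvTot s data := by
  induction data generalizing sc with
  | nil => simp [pvTot]
  | cons e data ih =>
    obtain ⟨ihk, ihv⟩ := ih ((pvEntryClaims e).items.foldl pvStepInner sc)
    constructor
    · rw [List.foldl_cons, List.foldl_cons, ihk, keys_foldl_pvStepInner]
      rfl
    · intro s
      have hne : (pvEntryClaims e).keys.Nodup := PySem.Dict.nodup_keys_ofList _
      rw [List.foldl_cons, ihv s, getD_foldl_pvStepInner,
        sum_filter_items (pvEntryClaims e) hne s]
      simp [pvTot]
      ring

-- the dedup fold keeps the accumulator Nodup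

lemma nodup_dedup_foldl (l : List String) (acc : List String) (h : acc.Nodup) :
    (l.foldl (fun acc s => if acc.contains s then acc else acc ++ [s]) acc).Nodup := by
  induction l generalizing acc with
  | nil => exact h
  | cons a l ih =>
    simp only [List.foldl_cons]
    by_cases hm : acc.contains a
    · rw [if_pos hm]; exact ih acc h
    · rw [if_neg hm]
      refine ih _ ?_
      have ha : a ∉ acc := by simpa using hm
      simp only [List.nodup_append, List.nodup_singleton, true_and]
      exact ⟨h, by simpa using fun b hb (hba : b = a) => ha (hba ▸ hb)⟩

lemma nodup_pvNames (data : List (List (String × List (String × List String)))) :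
    (pvNames data).Nodup := by
  unfold pvNames
  have : ∀ (acc : List String), acc.Nodup → (data.foldl pvNamesStep acc).Nodup := by
    induction data with
    | nil => intro acc h; exact h
    | cons e data ih =>
      intro acc h
      exact ih _ (nodup_dedup_foldl _ _ h)
  exact this [] List.nodup_nil

lemma pvTot_nonneg (s : String) (data : List (List (String × List (String × List String)))) :
    0 ≤ pvTot s data := by
  unfold pvTot
  induction data with
  | nil => simp
  | cons e data ih => simp only [List.map_cons, List.sum_cons]; positivity

lemma pvTot_eq_zero_iff (s : String) (data : List (List (String × List (String × List String)))) :
    (pvTot s data = 0) ↔ ∀ e ∈ data, ((pvEntryClaims e).getD s []).isEmpty = true := by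
  induction data with
  | nil => simp [pvTot]
  | cons e data ih =>
    have hn := pvTot_nonneg s data
    have hcons : pvTot s (e :: data) = (((pvEntryClaims e).getD s []).length : Int) + pvTot s data := by
      simp [pvTot]
    rw [hcons]
    constructor
    · intro h
      have h1 : ((pvEntryClaims e).getD s []).length = 0 := by omega
      have h2 : pvTot s data = 0 := by omega
      intro e' he'
      rcases List.mem_cons.mp he' with rfl | he'
      · simpa [List.isEmpty_iff, List.length_eq_zero_iff] using h1
      · exact (ih.mp h2) e' he'
    · intro h
      have h1 : ((pvEntryClaims e).getD s []).length = 0 := by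
        have := h e (List.mem_cons_self)
        simpa [List.isEmpty_iff, List.length_eq_zero_iff] using this
      have h2 : pvTot s data = 0 := ih.mpr (fun e' he' => h e' (List.mem_cons_of_mem _ he'))
      omega

-- the two filter conditions agree
lemma cond_eq (data : List (List (String × List (String × List String)))) (s : String) :
    ((pvTot s data) == 0) = !(data.any (fun entry => !((pvEntryClaims entry).getD s []).isEmpty)) := by
  by_cases h : ∀ e ∈ data, ((pvEntryClaims e).getD s []).isEmpty = true
  · have h0 := (pvTot_eq_zero_iff s data).mpr h
    simp only [h0, beq_self_eq_true, Bool.true_eq, Bool.not_eq_true', List.any_eq_false]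
    intro e he
    simp [h e he]
  · have h0 : pvTot s data ≠ 0 := fun hc => h ((pvTot_eq_zero_iff s data).mp hc)
    push Not at h
    obtain ⟨e, he, hne⟩ := h
    have : data.any (fun entry => !((pvEntryClaims entry).getD s []).isEmpty) = true := by
      refine List.any_eq_true.mpr ⟨e, he, ?_⟩
      simp [hne]
    simp [this, h0]

-- ===== VERDICT (by name: the statement is the Claim_ definition above) =====
theorem check_empty_claim_strategies_spec : Claim_equal_check_empty_claim_strategies := by
  intro data _
  unfold Spec_check_empty_claim_strategies check_empty_claim_strategies check_empty_claim_strategies_alt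
  obtain ⟨hk, hv⟩ := counts_outer data PySem.Dict.empty
  set counts := data.foldl (fun sc entry => (pvEntryClaims entry).items.foldl pvStepInner sc) PySem.Dict.empty with hc
  have hkeys : counts.keys = pvNames data := by
    rw [hk, PySem.Dict.keys_empty]; rfl
  have hnd : counts.keys.Nodup := hkeys ▸ nodup_pvNames data
  have hval : ∀ s, counts.getD s 0 = pvTot s data := by
    intro s; rw [hv s, PySem.Dict.getD_empty]; ring
  show (counts.items.filter (fun p => p.2 == 0)).map (·.1)
      = (pvNames data).filter (fun s => !(data.any (fun entry => !((pvEntryClaims entry).getD s []).isEmpty)))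
  rw [PySem.Dict.items_eq_map_keys counts hnd 0, List.filter_map]
  have hcomp : ((fun (p : String × Int) => p.2 == 0) ∘ (fun k => (k, counts.getD k 0)))
      = fun k => counts.getD k 0 == 0 := rfl
  rw [hcomp, List.map_map]
  have hfst : ((fun (p : String × Int) => p.1) ∘ (fun k => (k, counts.getD k 0))) = id := rfl
  rw [hfst, List.map_id, hkeys]
  exact List.filter_congr (fun s _ => by rw [hval s, cond_eq])
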